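-- pv_equiv track=rewrite | github.com/yogeverez/site-worker | app/content_generation_agent.py | _summarize_facts
-- ===== SOURCE A (Python) =====
-- from typing import Dict, List, Any, Optional
--
-- def _summarize_facts(facts: List[Dict[str, Any]]) -> str:
--     """Summarize research facts into a concise text."""
--     if not facts:
--         return "No specific research findings available."
--
--     summary_parts = []
--
--     # Group facts by type (if fact_type exists)
--     achievements = [f for f in facts if f.get("fact_type") == "achievement"]
--     projects = [f for f in facts if f.get("fact_type") == "project"]
--     education = [f for f in facts if f.get("fact_type") == "education"]
--
--     if achievements:
--         summary_parts.append(f"Achievements: Found {len(achievements)} recognition(s) or award(s)")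
--
--     if projects:
--         summary_parts.append(f"Projects: Identified {len(projects)} notable project(s)")
--
--     if education:
--         summary_parts.append(f"Education: Found {len(education)} educational credential(s)")
--
--     # If no categorized facts, summarize by source
--     if not (achievements or projects or education):
--         summary_parts.append(f"Found {len(facts)} research sources with relevant information")
--
--     # Add some specific content
--     for fact in facts[:3]:  # Top 3 facts
--         if fact.get("key_content"):
--             summary_parts.append(f"- {fact['key_content'][:100]}...")
--         elif fact.get("source_title"):
--             summary_parts.append(f"- From: {fact['source_title']}")
--
--     return "\n".join(summary_parts)
-- ===== SOURCE B (Python) =====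
-- def _summarize_facts(facts):
--     """Summarize research facts into a concise text."""
--     if not facts:
--         return "No specific research findings available."
--
--     # Single pass: count the three recognised fact types.
--     a = p = e = 0
--     for f in facts:
--         t = f.get("fact_type")
--         if t == "achievement":
--             a += 1
--         elif t == "project":
--             p += 1
--         elif t == "education":
--             e += 1
--
--     parts = []
--     if a:
--         parts.append(f"Achievements: Found {a} recognition(s) or award(s)")
--     if p:
--         parts.append(f"Projects: Identified {p} notable project(s)")
--     if e:
--         parts.append(f"Education: Found {e} educational credential(s)")
--     if a == 0 and p == 0 and e == 0:
--         parts.append(f"Found {len(facts)} research sources with relevant information")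
--
--     for fact in facts[:3]:
--         if fact.get("key_content"):
--             parts.append(f"- {fact['key_content'][:100]}...")
--         elif fact.get("source_title"):
--             parts.append(f"- From: {fact['source_title']}")
--
--     return "\n".join(parts)
-- ===== Notes on version B (the rewrite author's own statement) =====
-- stated objective: alternative
-- what changed: Replaces the three separate filter passes (building the achievement/project/education sublists) with a single counting pass keeping three counters, formatting the summary lines from the counts.
import Mathlib
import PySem

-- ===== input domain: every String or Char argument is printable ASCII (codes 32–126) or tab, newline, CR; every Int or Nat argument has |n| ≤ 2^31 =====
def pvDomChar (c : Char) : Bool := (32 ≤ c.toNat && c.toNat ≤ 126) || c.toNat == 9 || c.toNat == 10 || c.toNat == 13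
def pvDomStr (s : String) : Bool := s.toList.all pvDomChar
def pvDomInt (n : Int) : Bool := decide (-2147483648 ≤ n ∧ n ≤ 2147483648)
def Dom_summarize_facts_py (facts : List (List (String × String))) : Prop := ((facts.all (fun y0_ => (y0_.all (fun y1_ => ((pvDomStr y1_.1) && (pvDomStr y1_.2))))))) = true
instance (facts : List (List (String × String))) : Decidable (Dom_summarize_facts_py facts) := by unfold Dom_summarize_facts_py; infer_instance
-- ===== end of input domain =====

-- B replaces A's three filter passes over facts with a single counting pass; same return value.

-- shared helper: Python dict.get on an association list (lookup = first match)
def pvGetStr : List (String × String) → String → Option String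
  | [], _ => none
  | (k', v) :: rest, k => if k' == k then some v else pvGetStr rest k

-- Python truthiness of an Optional[str]: non-None and non-empty
def pvTruthy (o : Option String) : Bool :=
  match o with
  | none => false
  | some s => !(s == "")

-- the final 'for fact in facts[:3]' snippet loop, identical in both Pythons
def pvSnippets (parts : List String) (facts : List (List (String × String))) : List String :=
  (PySem.List.slice facts none (some 3)).foldl (fun ps f =>
    if pvTruthy (pvGetStr f "key_content") then
      ps ++ ["- " ++ PySem.Str.slice ((pvGetStr f "key_content").getD "") none (some 100) ++ "..."]
    else if pvTruthy (pvGetStr f "source_title") then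
      ps ++ ["- From: " ++ (pvGetStr f "source_title").getD ""]
    else ps) parts

-- ===== PORT A =====
def summarize_facts_py (facts : List (List (String × String))) : String :=
  if facts.isEmpty then "No specific research findings available."
  else
    let achievements := facts.filter (fun f => pvGetStr f "fact_type" == some "achievement")
    let projects := facts.filter (fun f => pvGetStr f "fact_type" == some "project")
    let education := facts.filter (fun f => pvGetStr f "fact_type" == some "education")
    let parts : List String := []
    let parts := if achievements.isEmpty then parts else
      parts ++ ["Achievements: Found " ++ PySem.Int.toStr (achievements.length : Int) ++ " recognition(s) or award(s)"]
    let parts := if projects.isEmpty then parts else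
      parts ++ ["Projects: Identified " ++ PySem.Int.toStr (projects.length : Int) ++ " notable project(s)"]
    let parts := if education.isEmpty then parts else
      parts ++ ["Education: Found " ++ PySem.Int.toStr (education.length : Int) ++ " educational credential(s)"]
    let parts := if achievements.isEmpty && projects.isEmpty && education.isEmpty then
      parts ++ ["Found " ++ PySem.Int.toStr (facts.length : Int) ++ " research sources with relevant information"]
      else parts
    PySem.Str.join "\n" (pvSnippets parts facts)

-- ===== PORT B =====
-- the single counting step of B's loop body
def pvCountStep (c : Nat × Nat × Nat) (f : List (String × String)) : Nat × Nat × Nat :=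
  let t := pvGetStr f "fact_type"
  if t == some "achievement" then (c.1 + 1, c.2.1, c.2.2)
  else if t == some "project" then (c.1, c.2.1 + 1, c.2.2)
  else if t == some "education" then (c.1, c.2.1, c.2.2 + 1)
  else c

def summarize_facts_py_alt (facts : List (List (String × String))) : String :=
  if facts.isEmpty then "No specific research findings available."
  else
    let c := facts.foldl pvCountStep (0, 0, 0)
    let a := c.1
    let p := c.2.1
    let e := c.2.2
    let parts : List String := []
    let parts := if a ≠ 0 then
      parts ++ ["Achievements: Found " ++ PySem.Int.toStr (a : Int) ++ " recognition(s) or award(s)"]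
      else parts
    let parts := if p ≠ 0 then
      parts ++ ["Projects: Identified " ++ PySem.Int.toStr (p : Int) ++ " notable project(s)"]
      else parts
    let parts := if e ≠ 0 then
      parts ++ ["Education: Found " ++ PySem.Int.toStr (e : Int) ++ " educational credential(s)"]
      else parts
    let parts := if a = 0 ∧ p = 0 ∧ e = 0 then
      parts ++ ["Found " ++ PySem.Int.toStr (facts.length : Int) ++ " research sources with relevant information"]
      else parts
    PySem.Str.join "\n" (pvSnippets parts facts)

-- ===== PRECONDITION & SPEC =====
def Spec_summarize_facts_py (facts : List (List (String × String))) (out : String) : Prop := out = summarize_facts_py_alt facts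
instance (facts : List (List (String × String))) (out : String) : Decidable (Spec_summarize_facts_py facts out) := by unfold Spec_summarize_facts_py; infer_instance

-- ===== CLAIM (what is proved, stated in full; the proofs are below) =====
def Claim_equal_summarize_facts_py : Prop := ∀ (facts : List (List (String × String))), Dom_summarize_facts_py facts → Spec_summarize_facts_py facts (summarize_facts_py facts)

-- ===== LEMMAS AND PROOFS =====

-- B's counting fold computes exactly the lengths of A's three filtered sublists
theorem pvCount_eq (facts : List (List (String × String))) (a p e : Nat) :
    facts.foldl pvCountStep (a, p, e) =
      (a + (facts.filter (fun f => pvGetStr f "fact_type" == some "achievement")).length,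
       p + (facts.filter (fun f => pvGetStr f "fact_type" == some "project")).length,
       e + (facts.filter (fun f => pvGetStr f "fact_type" == some "education")).length) := by
  induction facts generalizing a p e with
  | nil => simp
  | cons f rest ih =>
    simp only [List.foldl_cons, List.filter_cons]
    by_cases h1 : pvGetStr f "fact_type" == some "achievement"
    · have h2 : ¬ (pvGetStr f "fact_type" == some "project") = true := by
        simp only [beq_iff_eq] at h1 ⊢; simp [h1]
      have h3 : ¬ (pvGetStr f "fact_type" == some "education") = true := by
        simp only [beq_iff_eq] at h1 ⊢; simp [h1]
      simp [pvCountStep, h1, h2, h3, ih]; omega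
    · by_cases h2 : pvGetStr f "fact_type" == some "project"
      · have h3 : ¬ (pvGetStr f "fact_type" == some "education") = true := by
          simp only [beq_iff_eq] at h2 ⊢; simp [h2]
        simp [pvCountStep, h1, h2, h3, ih]; omega
      · by_cases h3 : pvGetStr f "fact_type" == some "education"
        · simp [pvCountStep, h1, h2, h3, ih]; omega
        · simp [pvCountStep, h1, h2, h3, ih]

-- ===== VERDICT (by name: the statement is the Claim_ definition above) =====
theorem summarize_facts_py_spec : Claim_equal_summarize_facts_py := by
  intro facts _
  unfold Spec_summarize_facts_py summarize_facts_py summarize_facts_py_alt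
  by_cases hE : facts.isEmpty
  · simp [hE]
  · simp only [hE, pvCount_eq facts 0 0 0, Nat.zero_add]
    by_cases hA : (facts.filter (fun f => pvGetStr f "fact_type" == some "achievement")).length = 0 <;>
    by_cases hP : (facts.filter (fun f => pvGetStr f "fact_type" == some "project")).length = 0 <;>
    by_cases hEd : (facts.filter (fun f => pvGetStr f "fact_type" == some "education")).length = 0 <;>
      simp [List.isEmpty_iff, List.length_eq_zero_iff.symm, hA, hP, hEd]
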